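-- pv_equiv track=rewrite | github.com/alex-bo/leetcode | a_test2.py | minimumDaysBFS
-- ===== SOURCE A (Python) =====
-- def minimumDaysBFS(rows, columns, grid):
--     grid = [[grid[r][c] for c in range(columns)] for r in range(rows)]
--     day1_queue = []
--     days = 0
--     for i, row in enumerate(grid):
--         for j, cell in enumerate(row):
--             if cell == 1:
--                 day1_queue.append((i, j))
--     while True:
--         day2_queue = []
--         while day1_queue:
--             i, j = day1_queue.pop()
--             try_add_to_queue(grid, i - 1, j, day2_queue)
--             try_add_to_queue(grid, i, j - 1, day2_queue)
--             try_add_to_queue(grid, i + 1, j, day2_queue)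
--             try_add_to_queue(grid, i, j + 1, day2_queue)
--         if not day2_queue:
--             break
--         day1_queue = day2_queue
--         days += 1
--     return days
--
-- def try_add_to_queue(grid, i, j, queue):
--     if 0 <= i < len(grid) and 0 <= j < len(grid[i]) and grid[i][j] == 0:
--         queue.append((i, j))
--         grid[i][j] = 1
-- ===== SOURCE B (Python) =====
-- def minimumDaysBFS(rows, columns, grid):
--     g = [[grid[r][c] for c in range(columns)] for r in range(rows)]
--     days = 0
--     while True:
--         ng = _dilate(g)
--         if ng == g:
--             return days
--         g = ng
--         days += 1
--
-- def _dilate(g):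
--     return [[1 if cell == 0 and _has_one_neighbor(g, i, j) else cell
--              for j, cell in enumerate(row)]
--             for i, row in enumerate(g)]
--
-- def _has_one_neighbor(g, i, j):
--     for di, dj in ((-1, 0), (1, 0), (0, -1), (0, 1)):
--         ni, nj = i + di, j + dj
--         if 0 <= ni < len(g) and 0 <= nj < len(g[ni]) and g[ni][nj] == 1:
--             return True
--     return False
-- ===== Notes on version B (the rewrite author's own statement) =====
-- stated objective: simpler
-- what changed: Replaces the two-queue frontier BFS with mutation-on-enqueue by a pure synchronous dilation: each day the whole grid is recomputed (a 0-cell with a 1-neighbor becomes 1) until it stops changing, counting the productive steps; no queues, no in-place marking.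
import Mathlib
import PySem

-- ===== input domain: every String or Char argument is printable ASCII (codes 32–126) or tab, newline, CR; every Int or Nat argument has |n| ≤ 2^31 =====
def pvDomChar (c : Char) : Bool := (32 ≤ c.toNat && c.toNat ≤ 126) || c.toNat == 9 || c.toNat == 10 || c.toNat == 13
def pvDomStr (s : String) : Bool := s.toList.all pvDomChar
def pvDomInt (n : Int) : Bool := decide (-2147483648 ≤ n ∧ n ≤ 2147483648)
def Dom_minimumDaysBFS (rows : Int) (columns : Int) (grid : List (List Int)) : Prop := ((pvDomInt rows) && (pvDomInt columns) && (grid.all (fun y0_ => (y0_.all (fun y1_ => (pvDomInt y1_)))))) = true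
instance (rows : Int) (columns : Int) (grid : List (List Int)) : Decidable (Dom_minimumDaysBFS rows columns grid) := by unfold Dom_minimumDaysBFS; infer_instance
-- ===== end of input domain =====

-- B replaces A's two-queue frontier BFS (with in-place marking on enqueue) by a pure
-- synchronous whole-grid dilation iterated until a fixpoint, counting productive steps
-- (objective: simpler; neither version mutates the caller's grid — both copy it first).

-- ===== PORT A =====

-- both Pythons start with the identical copy comprehension
-- 'g = [[grid[r][c] for c in range(columns)] for r in range(rows)]'
def pvCopyGrid (rows : Int) (columns : Int) (grid : List (List Int)) : List (List Int) :=
  (PySem.List.pyRange 0 rows 1).map (fun r =>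
    (PySem.List.pyRange 0 columns 1).map (fun c =>
      PySem.List.pyGetD (PySem.List.pyGetD grid r []) c 0))

def tryAddToQueue (g : List (List Int)) (i j : Int) (q : List (Int × Int)) :
    List (List Int) × List (Int × Int) :=
  if 0 ≤ i ∧ i < (g.length : Int) ∧ 0 ≤ j ∧
      j < ((PySem.List.pyGetD g i []).length : Int) ∧
      PySem.List.pyGetD (PySem.List.pyGetD g i []) j 0 = 0 then
    (PySem.List.pySetD g i (PySem.List.pySetD (PySem.List.pyGetD g i []) j 1), q ++ [(i, j)])
  else (g, q)

-- the sources double loop: for i,row in enumerate(grid): for j,cell in enumerate(row): …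
def pvSources (g : List (List Int)) : List (Int × Int) :=
  (PySem.List.enumerate g).flatMap (fun ir =>
    (PySem.List.enumerate ir.2).filterMap (fun jc =>
      if jc.2 = 1 then some (ir.1, jc.1) else none))

-- the inner 'while day1_queue: i, j = day1_queue.pop(); …' loop;
-- Python pops from the END, so the caller passes the queue REVERSED
def pvLevel : List (List Int) → List (Int × Int) → List (Int × Int) →
    List (List Int) × List (Int × Int)
  | g, [], d2 => (g, d2)
  | g, (i, j) :: rest, d2 =>
      let s1 := tryAddToQueue g (i - 1) j d2
      let s2 := tryAddToQueue s1.1 i (j - 1) s1.2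
      let s3 := tryAddToQueue s2.1 (i + 1) j s2.2
      let s4 := tryAddToQueue s3.1 i (j + 1) s3.2
      pvLevel s4.1 rest s4.2

-- the outer 'while True' loop; fuel is only a totality guard (each productive level
-- turns at least one 0 into a 1, so (#zeros + 1) iterations always suffice)
def pvLoopA : Nat → List (List Int) → List (Int × Int) → Int → Int
  | 0, _, _, days => days
  | fuel + 1, g, q, days =>
      let r := pvLevel g q.reverse []
      if r.2 = [] then days else pvLoopA fuel r.1 r.2 (days + 1)

def minimumDaysBFS (rows : Int) (columns : Int) (grid : List (List Int)) : Int :=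
  let g := pvCopyGrid rows columns grid
  pvLoopA (g.flatten.count 0 + 1) g (pvSources g) 0

-- ===== PORT B =====

def pvHasOneNeighbor (g : List (List Int)) (i j : Int) : Bool :=
  [((-1 : Int), (0 : Int)), (1, 0), (0, -1), (0, 1)].any (fun d =>
    let ni := i + d.1
    let nj := j + d.2
    decide (0 ≤ ni) && decide (ni < (g.length : Int)) && decide (0 ≤ nj) &&
      decide (nj < ((PySem.List.pyGetD g ni []).length : Int)) &&
      decide (PySem.List.pyGetD (PySem.List.pyGetD g ni []) nj 0 = 1))

def pvDilate (g : List (List Int)) : List (List Int) :=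
  (PySem.List.enumerate g).map (fun ir =>
    (PySem.List.enumerate ir.2).map (fun jc =>
      if jc.2 = 0 ∧ pvHasOneNeighbor g ir.1 jc.1 then 1 else jc.2))

-- 'while True: ng = _dilate(g); if ng == g: return days; g = ng; days += 1';
-- fuel is only a totality guard, as in port A
def pvLoopB : Nat → List (List Int) → Int → Int
  | 0, _, days => days
  | fuel + 1, g, days =>
      let ng := pvDilate g
      if ng = g then days else pvLoopB fuel ng (days + 1)

def minimumDaysBFS_alt (rows : Int) (columns : Int) (grid : List (List Int)) : Int :=
  let g := pvCopyGrid rows columns grid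
  pvLoopB (g.flatten.count 0 + 1) g 0

-- ===== PRECONDITION & SPEC =====

-- Pre_ excludes exactly the inputs on which A's copy comprehension raises IndexError:
-- with a positive number of columns requested, rows exceeding len(grid) or one of the
-- first `rows` rows shorter than `columns` (when columns ≤ 0 nothing is ever indexed).
def Pre_minimumDaysBFS (rows : Int) (columns : Int) (grid : List (List Int)) : Prop :=
  columns ≤ 0 ∨
    (rows ≤ (grid.length : Int) ∧ ∀ row ∈ grid.take rows.toNat, columns ≤ (row.length : Int))

instance (rows : Int) (columns : Int) (grid : List (List Int)) :
    Decidable (Pre_minimumDaysBFS rows columns grid) := by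
  unfold Pre_minimumDaysBFS; infer_instance

def pvWitness_minimumDaysBFS : Int × Int × List (List Int) := (2, 2, [[0, 1], [0, 0]])

def Spec_minimumDaysBFS (rows : Int) (columns : Int) (grid : List (List Int)) (out : Int) : Prop := out = minimumDaysBFS_alt rows columns grid
instance (rows : Int) (columns : Int) (grid : List (List Int)) (out : Int) : Decidable (Spec_minimumDaysBFS rows columns grid out) := by unfold Spec_minimumDaysBFS; infer_instance

-- ===== CLAIM (what is proved, stated in full; the proofs are below) =====
def Claim_equal_minimumDaysBFS : Prop := ∀ (rows : Int) (columns : Int) (grid : List (List Int)), Dom_minimumDaysBFS rows columns grid → Pre_minimumDaysBFS rows columns grid → Spec_minimumDaysBFS rows columns grid (minimumDaysBFS rows columns grid)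

-- ===== LEMMAS AND PROOFS =====

-- proof-side vocabulary: in-bounds positions, cell lookup, the four neighbours, row shape
def gIn (g : List (List Int)) (p : Int × Int) : Bool :=
  decide (0 ≤ p.1 ∧ p.1 < (g.length : Int) ∧ 0 ≤ p.2 ∧
    p.2 < ((g.getD p.1.toNat []).length : Int))

def gCell (g : List (List Int)) (p : Int × Int) : Int :=
  (g.getD p.1.toNat []).getD p.2.toNat 0

def gMark (g : List (List Int)) (p : Int × Int) : List (List Int) :=
  g.set p.1.toNat ((g.getD p.1.toNat []).set p.2.toNat 1)

def nbrs (p : Int × Int) : List (Int × Int) :=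
  [(p.1 - 1, p.2), (p.1, p.2 - 1), (p.1 + 1, p.2), (p.1, p.2 + 1)]

def gShape (g : List (List Int)) : List Nat := g.map List.length

-- the frontier invariant: F cells are in-bounds 1-cells, and every 1-cell with a
-- 0-neighbour lies in F
def gInv (g : List (List Int)) (F : List (Int × Int)) : Prop :=
  (∀ f ∈ F, gIn g f = true ∧ gCell g f = 1) ∧
  (∀ p q, gIn g p = true → gCell g p = 0 → q ∈ nbrs p → gIn g q = true → gCell g q = 1 → q ∈ F)

-- a fold form of the four tryAddToQueue calls of one popped cell
def tAll (g : List (List Int)) (q : List (Int × Int)) (ts : List (Int × Int)) :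
    List (List Int) × List (Int × Int) :=
  ts.foldl (fun s t => tryAddToQueue s.1 t.1 t.2 s.2) (g, q)

theorem pyGetD_toNat {α : Type} (xs : List α) (i : Int) (d : α) (h : 0 ≤ i) :
    PySem.List.pyGetD xs i d = xs.getD i.toNat d := by
  simp [PySem.List.pyGetD, PySem.List.pyGet?_of_nonneg xs h, List.getD_eq_getElem?_getD]

theorem pySetD_toNat {α : Type} (xs : List α) (i : Int) (v : α) (h0 : 0 ≤ i)
    (h1 : i < (xs.length : Int)) : PySem.List.pySetD xs i v = xs.set i.toNat v := by
  unfold PySem.List.pySetD PySem.List.pySet? PySem.List.pyIdx?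
  rw [if_pos h0, if_pos h1]; rfl

theorem tryAdd_pos (g : List (List Int)) (i j : Int) (q : List (Int × Int))
    (h : gIn g (i, j) = true) (h0 : gCell g (i, j) = 0) :
    tryAddToQueue g i j q = (gMark g (i, j), q ++ [(i, j)]) := by
  simp only [gIn, decide_eq_true_eq] at h
  obtain ⟨h1, h2, h3, h4⟩ := h
  simp only [gCell] at h0
  unfold tryAddToQueue
  rw [pyGetD_toNat g i [] h1, pyGetD_toNat _ j 0 h3]
  rw [if_pos ⟨h1, h2, h3, h4, h0⟩]
  rw [pySetD_toNat _ j 1 h3 h4, pySetD_toNat g i _ h1 h2]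
  rfl

theorem tryAdd_neg (g : List (List Int)) (i j : Int) (q : List (Int × Int))
    (h : ¬(gIn g (i, j) = true ∧ gCell g (i, j) = 0)) :
    tryAddToQueue g i j q = (g, q) := by
  unfold tryAddToQueue
  rw [if_neg]
  intro ⟨h1, h2, h3, h4, h5⟩
  rw [pyGetD_toNat g i [] h1] at h4 h5
  rw [pyGetD_toNat _ j 0 h3] at h5
  exact h ⟨by simp only [gIn, decide_eq_true_eq]; exact ⟨h1, h2, h3, h4⟩, h5⟩

theorem shape_row_len (g : List (List Int)) (n : Nat) :
    (g.getD n []).length = (gShape g).getD n 0 := by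
  simp only [gShape, List.getD_eq_getElem?_getD, List.getElem?_map]
  cases g[n]? <;> rfl

theorem gIn_congr (g1 g2 : List (List Int)) (h : gShape g1 = gShape g2) (p : Int × Int) :
    (gIn g1 p = true ↔ gIn g2 p = true) := by
  have hl : g1.length = g2.length := by
    have := congrArg List.length h; simpa [gShape] using this
  simp only [gIn, decide_eq_true_eq, hl, shape_row_len, h]

theorem mark_shape (g : List (List Int)) (p : Int × Int) :
    gShape (gMark g p) = gShape g := by
  unfold gMark gShape
  rw [List.map_set]
  by_cases hn : p.1.toNat < g.length
  · apply List.ext_getElem <;> simp [List.getElem_set]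
    intro k hk hkp; subst hkp
    simp [List.getElem?_eq_getElem hn]
  · rw [List.set_eq_of_length_le]; simpa using Nat.le_of_not_lt hn

theorem mark_cell (g : List (List Int)) (p : Int × Int) (hp : gIn g p = true) (x : Int × Int)
    (hx : 0 ≤ x.1 ∧ 0 ≤ x.2) :
    gCell (gMark g p) x = if x = p then 1 else gCell g x := by
  obtain ⟨p1, p2⟩ := p
  obtain ⟨x1, x2⟩ := x
  simp only [gIn, decide_eq_true_eq] at hp
  obtain ⟨h1, h2, h3, h4⟩ := hp
  obtain ⟨hx1, hx2⟩ := hx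
  simp only at h2 h4 hx1 hx2
  unfold gCell gMark
  have hlt : p1.toNat < g.length := by omega
  by_cases e1 : x1 = p1
  · subst e1
    have hrow : (g.set x1.toNat ((g.getD x1.toNat []).set p2.toNat 1)).getD x1.toNat [] =
        (g.getD x1.toNat []).set p2.toNat 1 := by
      simp [List.getD_eq_getElem?_getD, hlt]
    simp only [hrow]
    by_cases e2 : x2 = p2
    · subst e2
      have hj : x2.toNat < (g.getD x1.toNat []).length := by omega
      rw [List.getD_eq_getElem?_getD] at hj
      simp [List.getD_eq_getElem?_getD, hj]
    · have ne2 : x2.toNat ≠ p2.toNat := by omega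
      simp [List.getD_eq_getElem?_getD, ne2.symm, Prod.ext_iff, e2]
  · have ne1 : x1.toNat ≠ p1.toNat := by omega
    simp [List.getD_eq_getElem?_getD, ne1.symm, Prod.ext_iff, e1]

theorem tAll_cons (g : List (List Int)) (q : List (Int × Int)) (i j : Int)
    (ts : List (Int × Int)) :
    tAll g q ((i, j) :: ts) =
      tAll (tryAddToQueue g i j q).1 (tryAddToQueue g i j q).2 ts := rfl

theorem gIn_pos (g : List (List Int)) (p : Int × Int) (hp : gIn g p = true) :
    0 ≤ p.1 ∧ 0 ≤ p.2 := by
  simp only [gIn, decide_eq_true_eq] at hp; exact ⟨hp.1, hp.2.2.1⟩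

theorem tAll_shape (ts : List (Int × Int)) (g : List (List Int)) (q : List (Int × Int)) :
    gShape (tAll g q ts).1 = gShape g := by
  induction ts generalizing g q with
  | nil => rfl
  | cons t ts ih =>
    obtain ⟨i, j⟩ := t
    rw [tAll_cons]
    by_cases h : gIn g (i, j) = true ∧ gCell g (i, j) = 0
    · rw [tryAdd_pos g i j q h.1 h.2]
      rw [ih, mark_shape]
    · rw [tryAdd_neg g i j q h]
      exact ih g q

theorem tAll_cell (ts : List (Int × Int)) (g : List (List Int)) (q : List (Int × Int))
    (p : Int × Int) (hp : gIn g p = true) :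
    gCell (tAll g q ts).1 p = if gCell g p = 0 ∧ p ∈ ts then 1 else gCell g p := by
  induction ts generalizing g q with
  | nil => simp [tAll]
  | cons t ts ih =>
    obtain ⟨i, j⟩ := t
    rw [tAll_cons]
    by_cases h : gIn g (i, j) = true ∧ gCell g (i, j) = 0
    · rw [tryAdd_pos g i j q h.1 h.2]
      have hp' : gIn (gMark g (i, j)) p = true :=
        (gIn_congr (gMark g (i, j)) g (mark_shape g (i, j)) p).mpr hp
      rw [ih _ _ hp', mark_cell g (i, j) h.1 p (gIn_pos g p hp)]
      by_cases ep : p = (i, j)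
      · simp [ep, h.2]
      · simp [List.mem_cons, ep]
    · rw [tryAdd_neg g i j q h]
      rw [ih g q hp]
      by_cases ep : p = (i, j)
      · have hc : gCell g p ≠ 0 := fun hc => h ⟨ep ▸ hp, ep ▸ hc⟩
        simp [hc]
      · simp only [List.mem_cons, ep, false_or]

theorem tAll_mem (ts : List (Int × Int)) (g : List (List Int)) (q : List (Int × Int))
    (x : Int × Int) :
    x ∈ (tAll g q ts).2 ↔ x ∈ q ∨ (gIn g x = true ∧ gCell g x = 0 ∧ x ∈ ts) := by
  induction ts generalizing g q with
  | nil => simp [tAll]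
  | cons t ts ih =>
    obtain ⟨i, j⟩ := t
    rw [tAll_cons]
    by_cases h : gIn g (i, j) = true ∧ gCell g (i, j) = 0
    · rw [tryAdd_pos g i j q h.1 h.2]
      rw [ih]
      constructor
      · rintro (hq | ⟨hin1, hc1, hts⟩)
        · rcases List.mem_append.mp hq with hq | hx
          · exact Or.inl hq
          · right
            have hx' : x = (i, j) := by simpa using hx
            exact ⟨hx' ▸ h.1, hx' ▸ h.2, by simp [hx']⟩
        · have hin : gIn g x = true :=
            (gIn_congr (gMark g (i, j)) g (mark_shape g (i, j)) x).mp hin1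
          rw [mark_cell g (i, j) h.1 x (gIn_pos g x hin)] at hc1
          by_cases ex : x = (i, j)
          · rw [if_pos ex] at hc1; norm_num at hc1
          · rw [if_neg ex] at hc1
            exact Or.inr ⟨hin, hc1, List.mem_cons_of_mem _ hts⟩
      · rintro (hq | ⟨hin, hc, hts⟩)
        · exact Or.inl (List.mem_append_left _ hq)
        · by_cases ex : x = (i, j)
          · exact Or.inl (List.mem_append_right _ (by simp [ex]))
          · right
            refine ⟨(gIn_congr (gMark g (i, j)) g (mark_shape g (i, j)) x).mpr hin, ?_, ?_⟩
            · rw [mark_cell g (i, j) h.1 x (gIn_pos g x hin), if_neg ex]; exact hc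
            · rcases List.mem_cons.mp hts with e | m
              · exact absurd e ex
              · exact m
    · rw [tryAdd_neg g i j q h]
      rw [ih]
      constructor
      · rintro (hq | ⟨hin, hc, hts⟩)
        · exact Or.inl hq
        · exact Or.inr ⟨hin, hc, List.mem_cons_of_mem _ hts⟩
      · rintro (hq | ⟨hin, hc, hts⟩)
        · exact Or.inl hq
        · rcases List.mem_cons.mp hts with e | m
          · exact absurd ⟨e ▸ hin, e ▸ hc⟩ h
          · exact Or.inr ⟨hin, hc, m⟩

theorem level_step (g : List (List Int)) (i j : Int) (rest d2 : List (Int × Int)) :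
    pvLevel g ((i, j) :: rest) d2 =
      pvLevel (tAll g d2 (nbrs (i, j))).1 rest (tAll g d2 (nbrs (i, j))).2 := rfl

theorem level_shape (F : List (Int × Int)) (g : List (List Int)) (d2 : List (Int × Int)) :
    gShape (pvLevel g F d2).1 = gShape g := by
  induction F generalizing g d2 with
  | nil => rfl
  | cons f rest ih =>
    obtain ⟨i, j⟩ := f
    rw [level_step, ih, tAll_shape]

theorem level_cell (F : List (Int × Int)) (g : List (List Int)) (d2 : List (Int × Int))
    (p : Int × Int) (hp : gIn g p = true) :
    gCell (pvLevel g F d2).1 p =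
      if gCell g p = 0 ∧ ∃ f ∈ F, p ∈ nbrs f then 1 else gCell g p := by
  induction F generalizing g d2 with
  | nil => simp [pvLevel]
  | cons f rest ih =>
    obtain ⟨i, j⟩ := f
    rw [level_step]
    have hp' : gIn (tAll g d2 (nbrs (i, j))).1 p = true :=
      (gIn_congr _ g (tAll_shape (nbrs (i, j)) g d2) p).mpr hp
    rw [ih _ _ hp', tAll_cell (nbrs (i, j)) g d2 p hp]
    by_cases en : p ∈ nbrs (i, j)
    · by_cases e0 : gCell g p = 0
      · rw [show (if gCell g p = 0 ∧ p ∈ nbrs (i, j) then (1 : Int) else gCell g p) = 1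
            from if_pos ⟨e0, en⟩]
        simp [e0, en]
      · rw [show (if gCell g p = 0 ∧ p ∈ nbrs (i, j) then (1 : Int) else gCell g p) = gCell g p
            from if_neg (fun hb => e0 hb.1)]
        simp [e0]
    · rw [show (if gCell g p = 0 ∧ p ∈ nbrs (i, j) then (1 : Int) else gCell g p) = gCell g p
            from if_neg (fun hb => en hb.2)]
      have hx : (∃ f ∈ (i, j) :: rest, p ∈ nbrs f) ↔ (∃ f ∈ rest, p ∈ nbrs f) := by
        constructor
        · rintro ⟨f, hf, hn⟩
          rcases List.mem_cons.mp hf with e | m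
          · exact absurd (e ▸ hn) en
          · exact ⟨f, m, hn⟩
        · rintro ⟨f, m, hn⟩
          exact ⟨f, List.mem_cons_of_mem _ m, hn⟩
      simp only [hx]

theorem level_mem (F : List (Int × Int)) (g : List (List Int)) (d2 : List (Int × Int))
    (x : Int × Int) :
    x ∈ (pvLevel g F d2).2 ↔
      x ∈ d2 ∨ (gIn g x = true ∧ gCell g x = 0 ∧ ∃ f ∈ F, x ∈ nbrs f) := by
  induction F generalizing g d2 with
  | nil => simp [pvLevel]
  | cons f rest ih =>
    obtain ⟨i, j⟩ := f
    rw [level_step, ih]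
    have hsh := tAll_shape (nbrs (i, j)) g d2
    constructor
    · rintro (hq | ⟨hin1, hc1, f', hf', hn⟩)
      · rcases (tAll_mem (nbrs (i, j)) g d2 x).mp hq with hq' | ⟨hin, hc, hn⟩
        · exact Or.inl hq'
        · exact Or.inr ⟨hin, hc, (i, j), by simp, hn⟩
      · have hin : gIn g x = true := (gIn_congr _ g hsh x).mp hin1
        rw [tAll_cell (nbrs (i, j)) g d2 x hin] at hc1
        by_cases hb : gCell g x = 0 ∧ x ∈ nbrs (i, j)
        · rw [if_pos hb] at hc1; norm_num at hc1
        · rw [if_neg hb] at hc1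
          exact Or.inr ⟨hin, hc1, f', List.mem_cons_of_mem _ hf', hn⟩
    · rintro (hq | ⟨hin, hc, f', hf', hn⟩)
      · exact Or.inl ((tAll_mem (nbrs (i, j)) g d2 x).mpr (Or.inl hq))
      · by_cases en : x ∈ nbrs (i, j)
        · exact Or.inl ((tAll_mem (nbrs (i, j)) g d2 x).mpr (Or.inr ⟨hin, hc, en⟩))
        · rcases List.mem_cons.mp hf' with e | m
          · exact absurd (e ▸ hn) en
          · right
            refine ⟨(gIn_congr _ g hsh x).mpr hin, ?_, f', m, hn⟩
            rw [tAll_cell (nbrs (i, j)) g d2 x hin]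
            rw [if_neg (fun hb => en hb.2)]
            exact hc

theorem nbrs_symm (p q : Int × Int) : q ∈ nbrs p ↔ p ∈ nbrs q := by
  obtain ⟨p1, p2⟩ := p
  obtain ⟨q1, q2⟩ := q
  simp only [nbrs, List.mem_cons, List.not_mem_nil, or_false, Prod.mk.injEq]
  omega

theorem enum_len {α : Type} (xs : List α) (s : Int) :
    (PySem.List.enumerate xs s).length = xs.length := by
  induction xs generalizing s with
  | nil => simp [PySem.List.enumerate_nil]
  | cons x xs ih => simp [PySem.List.enumerate_cons, ih]

theorem enum_getElem {α : Type} (xs : List α) (s : Int) (k : Nat) (h : k < xs.length)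
    (h2 : k < (PySem.List.enumerate xs s).length) :
    (PySem.List.enumerate xs s)[k] = (s + k, xs[k]) := by
  induction xs generalizing s k with
  | nil => simp at h
  | cons x xs ih =>
    cases k with
    | zero => simp [PySem.List.enumerate_cons]
    | succ k =>
      have hk : k < xs.length := by simpa using h
      have hk2 : k < (PySem.List.enumerate xs (s + 1)).length := by simpa [enum_len] using hk
      simp only [PySem.List.enumerate_cons, List.getElem_cons_succ, ih (s + 1) k hk hk2]
      refine Prod.ext ?_ rfl
      push_cast
      ring

theorem mem_enum {α : Type} (xs : List α) (s : Int) (x : Int × α) :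
    x ∈ PySem.List.enumerate xs s ↔
      ∃ (k : Nat) (h : k < xs.length), x = (s + k, xs[k]) := by
  rw [List.mem_iff_getElem]
  constructor
  · rintro ⟨k, hk, he⟩
    have hk' : k < xs.length := by simpa [enum_len] using hk
    exact ⟨k, hk', by rw [← he, enum_getElem xs s k hk' hk]⟩
  · rintro ⟨k, hk, he⟩
    exact ⟨k, by simpa [enum_len] using hk,
      by rw [enum_getElem xs s k hk (by simpa [enum_len] using hk)]; exact he.symm⟩

theorem probe_iff (g : List (List Int)) (ni nj : Int) :
    (decide (0 ≤ ni) && decide (ni < (g.length : Int)) && decide (0 ≤ nj) &&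
      decide (nj < ((PySem.List.pyGetD g ni []).length : Int)) &&
      decide (PySem.List.pyGetD (PySem.List.pyGetD g ni []) nj 0 = 1)) = true ↔
    gIn g (ni, nj) = true ∧ gCell g (ni, nj) = 1 := by
  simp only [Bool.and_eq_true, decide_eq_true_eq, gIn, gCell]
  constructor
  · rintro ⟨⟨⟨⟨h1, h2⟩, h3⟩, h4⟩, h5⟩
    rw [pyGetD_toNat g ni [] h1] at h4 h5
    rw [pyGetD_toNat _ nj 0 h3] at h5
    exact ⟨⟨h1, h2, h3, h4⟩, h5⟩
  · rintro ⟨hin, h5⟩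
    obtain ⟨h1, h2, h3, h4⟩ := hin
    rw [pyGetD_toNat g ni [] h1, pyGetD_toNat _ nj 0 h3]
    exact ⟨⟨⟨⟨h1, h2⟩, h3⟩, h4⟩, h5⟩

theorem hasOne_iff (g : List (List Int)) (i j : Int) :
    pvHasOneNeighbor g i j = true ↔ ∃ x ∈ nbrs (i, j), gIn g x = true ∧ gCell g x = 1 := by
  simp only [pvHasOneNeighbor, List.any_cons, List.any_nil, Bool.or_eq_true, Bool.or_false,
    probe_iff]
  simp only [nbrs, List.exists_mem_cons_iff, List.not_mem_nil]
  constructor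
  · rintro (h | h | h | h)
    · exact Or.inl (by simpa [sub_eq_add_neg] using h)
    · exact Or.inr (Or.inr (Or.inl (by simpa using h)))
    · exact Or.inr (Or.inl (by simpa [sub_eq_add_neg] using h))
    · exact Or.inr (Or.inr (Or.inr (Or.inl (by simpa using h))))
  · rintro (h | h | h | h)
    · exact Or.inl (by simpa [sub_eq_add_neg] using h)
    · exact Or.inr (Or.inr (Or.inl (by simpa [sub_eq_add_neg] using h)))
    · exact Or.inr (Or.inl (by simpa using h))
    · rcases h with h | h
      · exact Or.inr (Or.inr (Or.inr (by simpa using h)))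
      · exact absurd h (by simp)

theorem row_len_elem (g : List (List Int)) (n : Nat) (h : n < g.length) :
    (g.getD n []).length = g[n].length := by
  simp [List.getD_eq_getElem?_getD, List.getElem?_eq_getElem h]

theorem gCell_elem (g : List (List Int)) (p : Int × Int) (hk : p.1.toNat < g.length)
    (hj : p.2.toNat < g[p.1.toNat].length) : gCell g p = g[p.1.toNat][p.2.toNat] := by
  unfold gCell
  simp [List.getD_eq_getElem?_getD, hk, hj]

theorem dilate_row (g : List (List Int)) (k : Nat) (h : k < g.length)
    (h2 : k < (pvDilate g).length) :
    (pvDilate g)[k] = (PySem.List.enumerate g[k]).map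
      (fun jc => if jc.2 = 0 ∧ pvHasOneNeighbor g ((0 : Int) + k) jc.1 then 1 else jc.2) := by
  unfold pvDilate
  simp only [List.getElem_map, enum_getElem g 0 k h (by simpa [enum_len] using h)]

theorem dilate_shape (g : List (List Int)) : gShape (pvDilate g) = gShape g := by
  unfold gShape
  apply List.ext_getElem
  · simp [pvDilate]
  · intro k h1 h2
    have hk : k < g.length := by simpa using h2
    have hk2 : k < (pvDilate g).length := by simpa using h1
    simp only [List.getElem_map]
    rw [dilate_row g k hk hk2]
    simp

theorem dilate_cell (g : List (List Int)) (p : Int × Int) (hp : gIn g p = true) :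
    gCell (pvDilate g) p =
      if gCell g p = 0 ∧ pvHasOneNeighbor g p.1 p.2 = true then 1
      else gCell g p := by
  simp only [gIn, decide_eq_true_eq] at hp
  obtain ⟨h1, h2, h3, h4⟩ := hp
  have hk : p.1.toNat < g.length := by omega
  have hj : p.2.toNat < g[p.1.toNat].length := by
    rw [← row_len_elem g p.1.toNat hk]; omega
  have hk2 : p.1.toNat < (pvDilate g).length := by
    simpa [pvDilate, enum_len] using hk
  have hlen : p.2.toNat < ((PySem.List.enumerate g[p.1.toNat]).map
      (fun jc => if jc.2 = 0 ∧ pvHasOneNeighbor g ((0 : Int) + p.1.toNat) jc.1 then 1 else jc.2)).length := by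
    simpa [enum_len] using hj
  unfold gCell
  simp only [List.getD_eq_getElem?_getD]
  rw [List.getElem?_eq_getElem hk2]
  simp only [Option.getD_some]
  rw [dilate_row g p.1.toNat hk hk2]
  rw [List.getElem?_eq_getElem hlen]
  simp only [Option.getD_some, List.getElem_map,
    enum_getElem g[p.1.toNat] 0 p.2.toNat hj (by simpa [enum_len] using hj)]
  have e1 : ((0 : Int) + (p.1.toNat : Int)) = p.1 := by omega
  have e2 : ((0 : Int) + (p.2.toNat : Int)) = p.2 := by omega
  rw [e1, e2]
  rw [List.getElem?_eq_getElem hk]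
  simp only [Option.getD_some]
  rw [List.getElem?_eq_getElem hj]
  simp only [Option.getD_some]

theorem grid_ext (g1 g2 : List (List Int)) (hs : gShape g1 = gShape g2)
    (hc : ∀ p, gIn g1 p = true → gCell g1 p = gCell g2 p) : g1 = g2 := by
  have hlen : g1.length = g2.length := by
    simpa [gShape] using congrArg List.length hs
  apply List.ext_getElem hlen
  intro i hi1 hi2
  have hrow : g1[i].length = g2[i].length := by
    have h1 : (gShape g1)[i]'(by simpa [gShape] using hi1) =
        (gShape g2)[i]'(by simpa [gShape] using hi2) := List.getElem_of_eq hs _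
    simpa [gShape] using h1
  apply List.ext_getElem hrow
  intro j hj1 hj2
  have hin : gIn g1 ((i : Int), (j : Int)) = true := by
    simp only [gIn, decide_eq_true_eq]
    refine ⟨Int.natCast_nonneg i, by exact_mod_cast hi1, Int.natCast_nonneg j, ?_⟩
    rw [Int.toNat_natCast, row_len_elem g1 i hi1]
    exact_mod_cast hj1
  have hcc := hc ((i : Int), (j : Int)) hin
  rw [gCell_elem g1 _ (by simpa using hi1) (by simpa using hj1),
      gCell_elem g2 _ (by simpa using hi2) (by simpa using hj2)] at hcc
  simpa using hcc

theorem levelA_eq_dilate (g : List (List Int)) (F : List (Int × Int)) (hInv : gInv g F) :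
    (pvLevel g F.reverse []).1 = pvDilate g := by
  apply grid_ext
  · rw [level_shape, dilate_shape]
  · intro p hp0
    have hp : gIn g p = true := (gIn_congr _ g (level_shape F.reverse g []) p).mp hp0
    rw [level_cell F.reverse g [] p hp, dilate_cell g p hp]
    by_cases e0 : gCell g p = 0
    · have hiff : (∃ f ∈ F.reverse, p ∈ nbrs f) ↔ pvHasOneNeighbor g p.1 p.2 = true := by
        rw [hasOne_iff]
        constructor
        · rintro ⟨f, hf, hn⟩
          have hfP := hInv.1 f (List.mem_reverse.mp hf)
          exact ⟨f, (nbrs_symm p f).mpr hn, hfP.1, hfP.2⟩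
        · rintro ⟨x, hxn, hxin, hx1⟩
          have hxF : x ∈ F := hInv.2 p x hp e0 hxn hxin hx1
          exact ⟨x, List.mem_reverse.mpr hxF, (nbrs_symm p x).mp hxn⟩
      simp only [hiff]
    · simp [e0]

theorem inv_next (g : List (List Int)) (F : List (Int × Int)) (hInv : gInv g F) :
    gInv (pvDilate g) ((pvLevel g F.reverse []).2) := by
  constructor
  · intro f hf
    rw [level_mem] at hf
    rcases hf with h | ⟨hin, hc, f', hf', hn⟩
    · simp at h
    · refine ⟨(gIn_congr _ g (dilate_shape g) f).mpr hin, ?_⟩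
      have hfP := hInv.1 f' (List.mem_reverse.mp hf')
      have hone : pvHasOneNeighbor g f.1 f.2 = true :=
        (hasOne_iff g f.1 f.2).mpr ⟨f', (nbrs_symm f f').mpr hn, hfP.1, hfP.2⟩
      rw [dilate_cell g f hin, if_pos ⟨hc, hone⟩]
  · intro p q hpIn hp0 hqn hqIn hq1
    have hpg : gIn g p = true := (gIn_congr _ g (dilate_shape g) p).mp hpIn
    have hqg : gIn g q = true := (gIn_congr _ g (dilate_shape g) q).mp hqIn
    have hdp := dilate_cell g p hpg
    by_cases hcond : gCell g p = 0 ∧ pvHasOneNeighbor g p.1 p.2 = true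
    · rw [hdp, if_pos hcond] at hp0; norm_num at hp0
    · rw [hdp, if_neg hcond] at hp0
      have hdq := dilate_cell g q hqg
      by_cases hcq : gCell g q = 0 ∧ pvHasOneNeighbor g q.1 q.2 = true
      · obtain ⟨x, hxn, hxin, hx1⟩ := (hasOne_iff g q.1 q.2).mp hcq.2
        have hxF : x ∈ F := hInv.2 q x hqg hcq.1 hxn hxin hx1
        exact (level_mem F.reverse g [] q).mpr
          (Or.inr ⟨hqg, hcq.1, x, List.mem_reverse.mpr hxF, (nbrs_symm q x).mp hxn⟩)
      · rw [hdq, if_neg hcq] at hq1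
        exact absurd ⟨hp0, (hasOne_iff g p.1 p.2).mpr ⟨q, hqn, hqg, hq1⟩⟩ hcond

theorem d2_empty_iff (g : List (List Int)) (F : List (Int × Int)) (hInv : gInv g F) :
    ((pvLevel g F.reverse []).2 = [] ↔ pvDilate g = g) := by
  rw [List.eq_nil_iff_forall_not_mem]
  constructor
  · intro hno
    apply grid_ext _ _ (dilate_shape g)
    intro p hp0
    have hp : gIn g p = true := (gIn_congr _ g (dilate_shape g) p).mp hp0
    rw [dilate_cell g p hp]
    by_cases hcond : gCell g p = 0 ∧ pvHasOneNeighbor g p.1 p.2 = true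
    · exfalso
      obtain ⟨x, hxn, hxin, hx1⟩ := (hasOne_iff g p.1 p.2).mp hcond.2
      have hxF : x ∈ F := hInv.2 p x hp hcond.1 hxn hxin hx1
      exact hno p ((level_mem F.reverse g [] p).mpr
        (Or.inr ⟨hp, hcond.1, x, List.mem_reverse.mpr hxF, (nbrs_symm p x).mp hxn⟩))
    · rw [if_neg hcond]
  · intro heq x hx
    rw [level_mem] at hx
    rcases hx with h | ⟨hin, hc, f, hf, hn⟩
    · simp at h
    · have hfP := hInv.1 f (List.mem_reverse.mp hf)
      have hone : pvHasOneNeighbor g x.1 x.2 = true :=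
        (hasOne_iff g x.1 x.2).mpr ⟨f, (nbrs_symm x f).mpr hn, hfP.1, hfP.2⟩
      have hd := dilate_cell g x hin
      rw [if_pos ⟨hc, hone⟩, heq, hc] at hd
      norm_num at hd

theorem loop_eq (fuel : Nat) : ∀ (g : List (List Int)) (F : List (Int × Int)) (days : Int),
    gInv g F → pvLoopA fuel g F days = pvLoopB fuel g days := by
  induction fuel with
  | zero => intro g F days _; rfl
  | succ fuel ih =>
    intro g F days hInv
    by_cases hd : (pvLevel g F.reverse []).2 = []
    · have hfix : pvDilate g = g := (d2_empty_iff g F hInv).mp hd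
      simp [pvLoopA, pvLoopB, hd, hfix]
    · have hne : ¬ pvDilate g = g := fun he => hd ((d2_empty_iff g F hInv).mpr he)
      simp only [pvLoopA, pvLoopB, if_neg hd, if_neg hne]
      rw [levelA_eq_dilate g F hInv]
      exact ih (pvDilate g) _ (days + 1) (inv_next g F hInv)

theorem sources_mem (g : List (List Int)) (p : Int × Int) :
    p ∈ pvSources g ↔ gIn g p = true ∧ gCell g p = 1 := by
  unfold pvSources
  rw [List.mem_flatMap]
  constructor
  · rintro ⟨ir, hir, hp⟩
    rw [mem_enum] at hir
    obtain ⟨k, hk, rfl⟩ := hir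
    rw [List.mem_filterMap] at hp
    obtain ⟨jc, hjc, heq⟩ := hp
    rw [mem_enum] at hjc
    obtain ⟨m, hm, rfl⟩ := hjc
    by_cases h1 : g[k][m] = 1
    · simp only [if_pos h1, Option.some.injEq] at heq
      subst heq
      constructor
      · simp only [gIn, decide_eq_true_eq]
        refine ⟨by omega, ?_, by omega, ?_⟩
        · simp; omega
        · have : ((0 : Int) + (k : Int)).toNat = k := by omega
          rw [this, row_len_elem g k hk]
          simp; omega
      · have e1 : ((0 : Int) + (k : Int)).toNat = k := by omega
        have e2 : ((0 : Int) + (m : Int)).toNat = m := by omega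
        have hm' : m < g[k].length := by simpa using hm
        unfold gCell
        simp only [e1, e2, List.getD_eq_getElem?_getD]
        rw [List.getElem?_eq_getElem hk]
        simp only [Option.getD_some]
        rw [List.getElem?_eq_getElem hm']
        simpa using h1
    · rw [if_neg h1] at heq; cases heq
  · rintro ⟨hin, hc⟩
    have hin' := hin
    simp only [gIn, decide_eq_true_eq] at hin'
    obtain ⟨h1, h2, h3, h4⟩ := hin'
    have hk : p.1.toNat < g.length := by omega
    have hj : p.2.toNat < g[p.1.toNat].length := by
      rw [← row_len_elem g p.1.toNat hk]; omega
    refine ⟨((0 : Int) + p.1.toNat, g[p.1.toNat]), (mem_enum g 0 _).mpr ⟨p.1.toNat, hk, rfl⟩, ?_⟩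
    rw [List.mem_filterMap]
    refine ⟨((0 : Int) + p.2.toNat, g[p.1.toNat][p.2.toNat]), (mem_enum _ 0 _).mpr ⟨p.2.toNat, hj, rfl⟩, ?_⟩
    have hcell : g[p.1.toNat][p.2.toNat] = 1 := by
      rw [← gCell_elem g p hk hj]; exact hc
    rw [if_pos hcell]
    congr 1
    obtain ⟨a, b⟩ := p
    simp only at h1 h3 ⊢
    refine Prod.ext ?_ ?_ <;> simp <;> omega

theorem inv_init (g : List (List Int)) : gInv g (pvSources g) := by
  constructor
  · intro f hf
    exact (sources_mem g f).mp hf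
  · intro p q _ _ _ hq hcq
    exact (sources_mem g q).mpr ⟨hq, hcq⟩

-- ===== VERDICT (by name: the statement is the Claim_ definition above) =====
theorem minimumDaysBFS_spec : Claim_equal_minimumDaysBFS := by
  intro rows columns grid _ _
  unfold Spec_minimumDaysBFS minimumDaysBFS minimumDaysBFS_alt
  exact loop_eq _ _ _ _ (inv_init _)
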